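-- pv_equiv track=rewrite | github.com/google/security-research | pocs/cpus/tdxplore/py/devo.py | seqasciis
-- ===== SOURCE A (Python) =====
-- from string import ascii_letters, ascii_lowercase, ascii_uppercase, digits, printable, punctuation
--
-- def seqasciis(count: int) -> str:
--
--   array = list()
--
--   i = 0
--   while len(array) < count:
--     array.append(ascii_lowercase[i % len(ascii_lowercase)])
--     array.append(ascii_uppercase[i % len(ascii_uppercase)])
--     array.append(ascii_lowercase[i % len(ascii_lowercase)])
--     array.append(ascii_uppercase[i % len(ascii_uppercase)])
--     i = i + 1
--
--   return ''.join(array[:count])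
-- ===== SOURCE B (Python) =====
-- from string import ascii_lowercase, ascii_uppercase
--
-- def seqasciis(count: int) -> str:
--   return ''.join(
--       (ascii_lowercase if j % 2 == 0 else ascii_uppercase)[(j // 4) % 26]
--       for j in range(count))
-- ===== Notes on version B (the rewrite author's own statement) =====
-- stated objective: simpler
-- what changed: Replaces the grow-by-four-blocks-then-truncate while loop with a single join over range(count) computing each character directly from its position (parity picks lower/upper case, the position quartered modulo the alphabet length picks the letter).
import Mathlib
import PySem

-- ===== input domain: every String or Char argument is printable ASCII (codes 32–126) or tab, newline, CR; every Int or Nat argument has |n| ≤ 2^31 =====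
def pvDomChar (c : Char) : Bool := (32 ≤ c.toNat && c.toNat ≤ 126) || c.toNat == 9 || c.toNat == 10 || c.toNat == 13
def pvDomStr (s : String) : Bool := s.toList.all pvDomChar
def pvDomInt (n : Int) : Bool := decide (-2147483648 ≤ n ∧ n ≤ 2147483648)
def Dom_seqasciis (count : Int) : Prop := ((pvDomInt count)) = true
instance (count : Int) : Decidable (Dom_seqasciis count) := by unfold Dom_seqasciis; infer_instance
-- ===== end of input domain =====

-- B replaces A's append-4-characters-then-truncate while loop by one direct
-- per-position formula over range(count) (objective: simpler; same O(n) cost).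

-- ===== PORT A =====
def pvLower : List Char := "abcdefghijklmnopqrstuvwxyz".toList
def pvUpper : List Char := "ABCDEFGHIJKLMNOPQRSTUVWXYZ".toList

-- the while loop of A: each pass appends 4 characters and increments i
def seqasciisLoop (count : Int) (array : List Char) (i : Int) : List Char :=
  if h : (array.length : Int) < count then
    seqasciisLoop count
      (array ++ [PySem.List.pyGetD pvLower (PySem.Int.mod i 26) ' ',
                 PySem.List.pyGetD pvUpper (PySem.Int.mod i 26) ' ',
                 PySem.List.pyGetD pvLower (PySem.Int.mod i 26) ' ',
                 PySem.List.pyGetD pvUpper (PySem.Int.mod i 26) ' '])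
      (i + 1)
  else
    array
termination_by (count - array.length).toNat
decreasing_by simp; omega

def seqasciis (count : Int) : String :=
  String.ofList (PySem.List.slice (seqasciisLoop count [] 0) none (some count))

-- ===== PORT B =====
def seqasciis_alt (count : Int) : String :=
  String.ofList ((PySem.List.pyRange 0 count 1).map (fun j =>
    PySem.List.pyGetD (if PySem.Int.mod j 2 == 0 then pvLower else pvUpper)
      (PySem.Int.mod (PySem.Int.floordiv j 4) 26) ' '))

-- ===== PRECONDITION & SPEC =====
def Spec_seqasciis (count : Int) (out : String) : Prop := out = seqasciis_alt count
instance (count : Int) (out : String) : Decidable (Spec_seqasciis count out) := by unfold Spec_seqasciis; infer_instance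

-- ===== CLAIM (what is proved, stated in full; the proofs are below) =====
def Claim_equal_seqasciis : Prop := ∀ (count : Int), Dom_seqasciis count → Spec_seqasciis count (seqasciis count)

-- ===== LEMMAS AND PROOFS =====

-- pure description of what the loop appends: r characters still needed, block counter i
def pvChunks (r : Nat) (i : Int) : List Char :=
  if r = 0 then []
  else [PySem.List.pyGetD pvLower (PySem.Int.mod i 26) ' ',
        PySem.List.pyGetD pvUpper (PySem.Int.mod i 26) ' ',
        PySem.List.pyGetD pvLower (PySem.Int.mod i 26) ' ',
        PySem.List.pyGetD pvUpper (PySem.Int.mod i 26) ' '] ++ pvChunks (r - 4) (i + 1)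
termination_by r
decreasing_by omega

theorem seqasciisLoop_eq (count : Int) (array : List Char) (i : Int) :
    seqasciisLoop count array i = array ++ pvChunks (count - array.length).toNat i := by
  fun_induction seqasciisLoop count array i with
  | case1 array i h ih =>
      rw [ih]
      have hne : (count - (array.length : Int)).toNat ≠ 0 := by omega
      conv_rhs => rw [pvChunks.eq_def]
      simp only [if_neg hne]
      simp only [List.length_append, List.length_cons, List.length_nil, List.append_assoc]
      congr 3
      push_cast
      omega
  | case2 array i h =>
      have h0 : (count - (array.length : Int)).toNat = 0 := by omega
      conv_rhs => rw [pvChunks.eq_def]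
      simp [h0]

theorem pvChunks_getElem? (r : Nat) : ∀ (j : Nat) (i : Int), j < r →
    (pvChunks r i)[j]? =
      some (PySem.List.pyGetD (if j % 2 = 0 then pvLower else pvUpper)
        (PySem.Int.mod (i + (j / 4 : Nat)) 26) ' ') := by
  induction r using Nat.strong_induction_on with
  | _ r ih =>
    intro j i hj
    have hr : r ≠ 0 := by omega
    rw [pvChunks.eq_def]
    simp only [if_neg hr]
    by_cases h4 : j < 4
    · interval_cases j <;> simp
    · rw [List.getElem?_append_right (by simp; omega)]
      simp only [List.length_cons, List.length_nil]
      rw [ih (r - 4) (by omega) (j - 4) (i + 1) (by omega)]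
      have e1 : (j - 4) % 2 = j % 2 := by omega
      have e2 : (i + 1) + ((j - 4) / 4 : Nat) = i + (j / 4 : Nat) := by omega
      rw [e1, e2]

-- ===== VERDICT (by name: the statement is the Claim_ definition above) =====
theorem seqasciis_spec : Claim_equal_seqasciis := by
  intro count _
  unfold Spec_seqasciis seqasciis seqasciis_alt
  rw [seqasciisLoop_eq]
  simp only [List.nil_append, List.length_nil, Nat.cast_zero, sub_zero]
  by_cases hc : count ≤ 0
  · have h0 : count.toNat = 0 := by omega
    rw [h0, pvChunks.eq_def]
    simp [PySem.List.pyRange_one_eq_nil hc, PySem.List.slice]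
  · have hc' : 0 ≤ count := by omega
    rw [PySem.List.slice_to _ hc', PySem.List.pyRange_one]
    simp only [sub_zero]
    congr 1
    apply List.ext_getElem?
    intro j
    by_cases hj : j < count.toNat
    · rw [List.getElem?_take_of_lt hj]
      rw [pvChunks_getElem? count.toNat j 0 hj]
      rw [List.getElem?_map, List.getElem?_map]
      rw [List.getElem?_range hj]
      simp only [Option.map_some]
      have e2 : PySem.Int.mod ((0:Int) + (j:Int)) 2 = ((j % 2 : Nat) : Int) := by
        rw [zero_add]; exact_mod_cast PySem.Int.mod_natCast j 2
      have e4 : PySem.Int.floordiv ((0:Int) + (j:Int)) 4 = ((j / 4 : Nat) : Int) := by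
        rw [zero_add]; exact_mod_cast PySem.Int.floordiv_natCast j 4
      rw [e2, e4, zero_add]
      by_cases hp : j % 2 = 0 <;> simp [hp]
      · have hnd : ¬ (2 ∣ (j:Int)) := by omega
        rw [if_neg hnd]
    · have hj' : ¬ (j : Int) < count := by omega
      rw [List.getElem?_take]
      simp [hj]
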